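-- pv_equiv track=rewrite | github.com/samheadleand/Advent-of-Code-2021 | 2021-05/main.py | find_coords_in_line
-- ===== SOURCE A (Python) =====
-- def find_change_coord_in_line(coords):
--   start, finish = coords
--   x_inc = finish[0] - start[0]
--   y_inc = finish[1] - start[1]
--   return [
--     int(x_inc/abs(x_inc)) if x_inc != 0 else 0,
--     int(y_inc/abs(y_inc)) if y_inc != 0 else 0
--   ]
--
-- def find_coords_in_line(coords):
--   start, finish = coords
--   change_coord = find_change_coord_in_line(coords)
--   coords_in_line = [start]
--   current_coord = start
--   while current_coord != finish:
--     current_coord = [a + b for a, b in zip(current_coord, change_coord)]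
--     coords_in_line.append(current_coord)
--   return coords_in_line
-- ===== SOURCE B (Python) =====
-- def find_coords_in_line(coords):
--   start, finish = coords
--   x_inc = finish[0] - start[0]
--   y_inc = finish[1] - start[1]
--   sx = (x_inc > 0) - (x_inc < 0)
--   sy = (y_inc > 0) - (y_inc < 0)
--   n = max(abs(x_inc), abs(y_inc))
--   return [start] + [[start[0] + i * sx, start[1] + i * sy] for i in range(1, n + 1)]
-- ===== Notes on version B (the rewrite author's own statement) =====
-- stated objective: simpler
-- what changed: Replaces A's equality-terminated incremental walk (repeated zip-add until the current point equals finish) with a counted closed-form generation: compute the step count n = max(|dx|,|dy|) and the per-axis sign once, then emit point i = start + i*(sx,sy) by a single comprehension.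
-- outside the precondition, e.g. on find_coords_in_line([[0, 0, 5], [0, 0]]): A returns [[0, 0, 5], [0, 0]], B returns [[0, 0, 5]]
import Mathlib
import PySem

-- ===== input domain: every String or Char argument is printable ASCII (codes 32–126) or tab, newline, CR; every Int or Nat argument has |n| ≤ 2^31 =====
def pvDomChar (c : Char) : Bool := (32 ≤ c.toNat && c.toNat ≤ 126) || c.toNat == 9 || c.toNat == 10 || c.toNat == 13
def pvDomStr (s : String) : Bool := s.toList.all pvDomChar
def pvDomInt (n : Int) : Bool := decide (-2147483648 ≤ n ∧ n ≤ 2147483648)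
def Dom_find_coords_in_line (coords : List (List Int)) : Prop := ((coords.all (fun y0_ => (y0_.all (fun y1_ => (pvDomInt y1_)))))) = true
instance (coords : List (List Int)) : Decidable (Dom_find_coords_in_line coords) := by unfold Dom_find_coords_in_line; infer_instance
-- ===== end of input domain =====

-- B replaces A's equality-terminated walk by a counted closed-form generation (same cost, simpler);
-- equivalence is claimed on Pre_: two length-2 points on an axis-aligned or 45° line (elsewhere A
-- raises, diverges, or its zip-truncation behaviour is accidental).

-- ===== PORT A =====
-- port of int(x/abs(x)): exact integer division (the quotient is exactly ±1 for x ≠ 0)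
def pvSignDiv (x : Int) : Int := x / |x|

-- helper find_change_coord_in_line; [] stands for the IndexError/unpack-error cases (outside Pre_)
def find_change_coord_in_line (coords : List (List Int)) : List Int :=
  match coords with
  | [start, finish] =>
    match PySem.List.pyGet? start 0, PySem.List.pyGet? start 1,
          PySem.List.pyGet? finish 0, PySem.List.pyGet? finish 1 with
    | some s0, some s1, some f0, some f1 =>
      [if f0 - s0 ≠ 0 then pvSignDiv (f0 - s0) else 0,
       if f1 - s1 ≠ 0 then pvSignDiv (f1 - s1) else 0]
    | _, _, _, _ => []
  | _ => []

-- the while loop of A; 'fuel' is only a totality guard (never exhausted inside Pre_)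
def pvWalk (finish change : List Int) (cur : List Int) : Nat → List (List Int)
  | 0 => []
  | fuel + 1 =>
    if cur = finish then []
    else
      List.zipWith (· + ·) cur change
        :: pvWalk finish change (List.zipWith (· + ·) cur change) fuel

def find_coords_in_line (coords : List (List Int)) : List (List Int) :=
  match coords with
  | [start, finish] =>
    match PySem.List.pyGet? start 0, PySem.List.pyGet? start 1,
          PySem.List.pyGet? finish 0, PySem.List.pyGet? finish 1 with
    | some s0, some s1, some f0, some f1 =>
      let change_coord := find_change_coord_in_line coords
      start :: pvWalk finish change_coord start ((f0 - s0).natAbs + (f1 - s1).natAbs + 1)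
    | _, _, _, _ => []
  | _ => []

-- ===== PORT B =====
def find_coords_in_line_alt (coords : List (List Int)) : List (List Int) :=
  match coords with
  | [start, finish] =>
    match PySem.List.pyGet? start 0, PySem.List.pyGet? start 1,
          PySem.List.pyGet? finish 0, PySem.List.pyGet? finish 1 with
    | some s0, some s1, some f0, some f1 =>
      let x_inc := f0 - s0
      let y_inc := f1 - s1
      let sx : Int := (if x_inc > 0 then 1 else 0) - (if x_inc < 0 then 1 else 0)
      let sy : Int := (if y_inc > 0 then 1 else 0) - (if y_inc < 0 then 1 else 0)
      let n : Nat := max x_inc.natAbs y_inc.natAbs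
      [start] ++ (PySem.List.pyRange 1 ((n : Int) + 1) 1).map (fun i => [s0 + i * sx, s1 + i * sy])
    | _, _, _, _ => []
  | _ => []

-- ===== PRECONDITION & SPEC =====
-- Pre_ excludes: inputs that are not exactly two length-2 points (A raises on short ones, and on longer
-- points A's zip silently truncates every subsequent point — an accident of the implementation), and
-- lines that are neither axis-aligned nor 45° diagonal (there A's while loop never terminates).
def Pre_find_coords_in_line (coords : List (List Int)) : Prop :=
  coords.length = 2 ∧
  (coords.getD 0 []).length = 2 ∧
  (coords.getD 1 []).length = 2 ∧
  (let s := coords.getD 0 []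
   let f := coords.getD 1 []
   let dx := f.getD 0 0 - s.getD 0 0
   let dy := f.getD 1 0 - s.getD 1 0
   dx = 0 ∨ dy = 0 ∨ dx.natAbs = dy.natAbs)
instance (coords : List (List Int)) : Decidable (Pre_find_coords_in_line coords) := by
  unfold Pre_find_coords_in_line; infer_instance

def pvWitness_find_coords_in_line : List (List Int) := [[0, 0], [3, 3]]

def Spec_find_coords_in_line (coords : List (List Int)) (out : List (List Int)) : Prop := out = find_coords_in_line_alt coords
instance (coords : List (List Int)) (out : List (List Int)) : Decidable (Spec_find_coords_in_line coords out) := by unfold Spec_find_coords_in_line; infer_instance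

-- ===== CLAIM (what is proved, stated in full; the proofs are below) =====
def Claim_equal_find_coords_in_line : Prop := ∀ (coords : List (List Int)), Dom_find_coords_in_line coords → Pre_find_coords_in_line coords → Spec_find_coords_in_line coords (find_coords_in_line coords)

-- ===== LEMMAS AND PROOFS =====

-- x / |x| is the sign of x, for x ≠ 0
theorem pvSignDiv_pos {x : Int} (h : 0 < x) : pvSignDiv x = 1 := by
  unfold pvSignDiv
  rw [abs_of_pos h, Int.ediv_self (by omega)]

theorem pvSignDiv_neg {x : Int} (h : x < 0) : pvSignDiv x = -1 := by
  unfold pvSignDiv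
  rw [abs_of_neg h, Int.ediv_neg, Int.ediv_self (by omega)]

-- A's walk, started at [a, b] with change [sx, sy] toward finish = [a + n*sx, b + n*sy],
-- produces exactly the counted points, provided the finish is actually reached at step n.
theorem pvWalk_closed_form (n : Nat) :
    ∀ (a b sx sy : Int), (n ≠ 0 → ¬ (sx = 0 ∧ sy = 0)) → ∀ fuel, n < fuel →
      pvWalk [a + n * sx, b + n * sy] [sx, sy] [a, b] fuel
        = (List.range n).map (fun (k : Nat) => [a + ((k : Int) + 1) * sx, b + ((k : Int) + 1) * sy]) := by
  induction n with
  | zero =>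
    intro a b sx sy _ fuel hfuel
    match fuel, hfuel with
    | m + 1, _ =>
      simp [pvWalk]
  | succ n ih =>
    intro a b sx sy hne fuel hfuel
    match fuel, hfuel with
    | m + 1, hfuel =>
      have hnz : ¬ (sx = 0 ∧ sy = 0) := hne (Nat.succ_ne_zero n)
      have hneq : ([a, b] : List Int) ≠ [a + (↑(n + 1)) * sx, b + (↑(n + 1)) * sy] := by
        intro h
        injection h with h1 h2
        injection h2 with h2 _
        push_cast at h1 h2
        rcases not_and_or.mp hnz with hx | hy
        · have : ((n : Int) + 1) * sx ≠ 0 := mul_ne_zero (by positivity) hx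
          omega
        · have : ((n : Int) + 1) * sy ≠ 0 := mul_ne_zero (by positivity) hy
          omega
      rw [pvWalk, if_neg hneq]
      have hzip : List.zipWith (· + ·) [a, b] [sx, sy] = [a + sx, b + sy] := rfl
      rw [hzip]
      have hfin : ([a + (↑(n + 1)) * sx, b + (↑(n + 1)) * sy] : List Int)
          = [(a + sx) + n * sx, (b + sy) + n * sy] := by
        push_cast; ring_nf
      rw [hfin, ih (a + sx) (b + sy) sx sy (fun _ => hnz) m (by omega)]
      rw [List.range_succ_eq_map]
      simp only [List.map_cons, List.map_map]
      congr 1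
      · norm_num
      · apply List.map_congr_left
        intro k _
        simp only [Function.comp_apply, List.cons.injEq, and_true]
        push_cast
        constructor <;> ring

-- B's range of indices 1..n
theorem pvRange_one_to (n : Nat) :
    PySem.List.pyRange 1 ((n : Int) + 1) 1 = (List.range n).map (fun (k : Nat) => (k : Int) + 1) := by
  rw [PySem.List.pyRange_one]
  have : ((n : Int) + 1 - 1).toNat = n := by omega
  rw [this]
  apply List.map_congr_left
  intro k _
  ring

-- ===== VERDICT (by name: the statement is the Claim_ definition above) =====
theorem find_coords_in_line_spec : Claim_equal_find_coords_in_line := by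
  intro coords _ hpre
  obtain ⟨hlen, hs, hf, hline⟩ := hpre
  match coords, hlen with
  | [s, f], _ =>
    simp only [List.getD, List.getElem?_cons_zero, List.getElem?_cons_succ,
      Option.getD_some] at hs hf hline
    match s, hs with
    | [s0, s1], _ =>
      match f, hf with
      | [f0, f1], _ =>
        simp only [List.getElem?_cons_zero, List.getElem?_cons_succ,
          Option.getD_some] at hline
        unfold Spec_find_coords_in_line find_coords_in_line find_coords_in_line_alt
          find_change_coord_in_line
        have h0 : PySem.List.pyGet? [s0, s1] 0 = some s0 := rfl
        have h1 : PySem.List.pyGet? [s0, s1] 1 = some s1 := rfl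
        have h2 : PySem.List.pyGet? [f0, f1] 0 = some f0 := rfl
        have h3 : PySem.List.pyGet? [f0, f1] 1 = some f1 := rfl
        simp only [h0, h1, h2, h3]
        set dx := f0 - s0 with hdx
        set dy := f1 - s1 with hdy
        set sx : Int := (if dx > 0 then 1 else 0) - (if dx < 0 then 1 else 0) with hsx
        set sy : Int := (if dy > 0 then 1 else 0) - (if dy < 0 then 1 else 0) with hsy
        set n : Nat := max dx.natAbs dy.natAbs with hn
        -- A's change coord equals B's signs
        have hchx : (if dx ≠ 0 then pvSignDiv dx else 0) = sx := by
          rcases lt_trichotomy dx 0 with h | h | h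
          · rw [if_pos (by omega), pvSignDiv_neg h, hsx, if_neg (by omega), if_pos h]; norm_num
          · rw [if_neg (by omega), hsx, if_neg (by omega), if_neg (by omega)]; norm_num
          · rw [if_pos (by omega), pvSignDiv_pos h, hsx, if_pos h, if_neg (by omega)]; norm_num
        have hchy : (if dy ≠ 0 then pvSignDiv dy else 0) = sy := by
          rcases lt_trichotomy dy 0 with h | h | h
          · rw [if_pos (by omega), pvSignDiv_neg h, hsy, if_neg (by omega), if_pos h]; norm_num
          · rw [if_neg (by omega), hsy, if_neg (by omega), if_neg (by omega)]; norm_num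
          · rw [if_pos (by omega), pvSignDiv_pos h, hsy, if_pos h, if_neg (by omega)]; norm_num
        rw [hchx, hchy]
        -- finish = start + n * sign, thanks to the line condition
        have hfx : f0 = s0 + (n : Int) * sx := by
          rcases lt_trichotomy dx 0 with h | h | h <;>
            rcases lt_trichotomy dy 0 with h' | h' | h' <;>
            · rw [hsx]
              split_ifs <;> omega
        have hfy : f1 = s1 + (n : Int) * sy := by
          rcases lt_trichotomy dx 0 with h | h | h <;>
            rcases lt_trichotomy dy 0 with h' | h' | h' <;>
            · rw [hsy]
              split_ifs <;> omega
        have hnz : n ≠ 0 → ¬ (sx = 0 ∧ sy = 0) := by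
          intro hne ⟨hx0, hy0⟩
          rw [hsx] at hx0; rw [hsy] at hy0
          have hdx0 : dx = 0 := by split_ifs at hx0 <;> omega
          have hdy0 : dy = 0 := by split_ifs at hy0 <;> omega
          omega
        have hfuel : n < dx.natAbs + dy.natAbs + 1 := by omega
        conv_lhs => rw [show ([f0, f1] : List Int) = [s0 + (n : Int) * sx, s1 + (n : Int) * sy] by
          rw [← hfx, ← hfy]]
        rw [pvWalk_closed_form n s0 s1 sx sy hnz _ hfuel, pvRange_one_to]
        simp only [List.map_map, List.singleton_append]
        congr 1
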